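-- pv_equiv track=rewrite | github.com/Samvel10/project | data/symbol_blocklist.py | parse_symbols_argument
-- ===== SOURCE A (Python) =====
-- from typing import Iterable, List, Sequence, Set, Tuple
--
-- def _normalize_symbol(symbol: str) -> str:
--     return str(symbol or "").strip().upper()
--
-- def parse_symbols_argument(raw: str) -> List[str]:
--     if raw is None:
--         return []
--     text = str(raw).replace("\n", ",")
--     parts = [p.strip() for p in text.split(",")]
--     out: List[str] = []
--     seen: Set[str] = set()
--     for p in parts:
--         sym = _normalize_symbol(p)
--         if sym and sym not in seen:
--             seen.add(sym)
--             out.append(sym)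
--     return out
-- ===== SOURCE B (Python) =====
-- from typing import List
--
--
-- def _normalize_symbol(symbol: str) -> str:
--     return str(symbol or "").strip().upper()
--
--
-- def parse_symbols_argument(raw: str) -> List[str]:
--     if raw is None:
--         return []
--     text = str(raw).replace("\n", ",")
--     syms = [s for s in (_normalize_symbol(p) for p in text.split(",")) if s]
--     # Selection-style dedup: repeatedly take the first remaining symbol and
--     # purge every later copy of it from the worklist. Correct because purging
--     # later copies of the head never touches the first occurrence of any other
--     # symbol, so the heads are exactly the first occurrences in order.
--     out: List[str] = []
--     rest = syms
--     while rest: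
--         head = rest[0]
--         out.append(head)
--         rest = [x for x in rest[1:] if x != head]
--     return out
-- ===== Notes on version B (the rewrite author's own statement) =====
-- stated objective: alternative
-- what changed: A's fused strip/normalize/seen-set loop is replaced by a selection-style worklist: collect the nonempty normalized symbols first, then repeatedly emit the first remaining symbol and filter all its later copies out of the worklist, so no seen set or membership branch exists at all.
import Mathlib
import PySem

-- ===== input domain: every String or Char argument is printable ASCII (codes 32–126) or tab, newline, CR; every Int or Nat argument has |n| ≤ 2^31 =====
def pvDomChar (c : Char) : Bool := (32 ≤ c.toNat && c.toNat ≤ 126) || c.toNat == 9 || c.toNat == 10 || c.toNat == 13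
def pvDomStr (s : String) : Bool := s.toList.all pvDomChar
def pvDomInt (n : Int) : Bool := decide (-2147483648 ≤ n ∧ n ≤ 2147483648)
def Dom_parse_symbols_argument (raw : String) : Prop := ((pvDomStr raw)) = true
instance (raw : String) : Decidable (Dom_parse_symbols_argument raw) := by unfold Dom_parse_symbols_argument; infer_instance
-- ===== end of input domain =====

-- B replaces A's fused strip/normalize/seen-set loop by a selection-style worklist:
-- collect the nonempty normalized symbols, then repeatedly emit the first remaining
-- one and filter its later copies out of the worklist; no seen set at all.


-- ===== PORT A =====
-- _normalize_symbol: for a str argument, 'str(symbol or "")' is symbol itself when nonempty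
-- and "" when empty; strip/upper of "" is "", so it equals strip-then-upper of the argument.
def pvNormalizeSymbol (symbol : String) : String :=
  PySem.Str.upper (PySem.Str.strip symbol)

def parse_symbols_argument (raw : String) : List String :=
  let text := PySem.Str.replace raw "\n" ","
  -- text.split(",") — sep is nonempty, so split? is always some
  let parts := ((PySem.Str.split? text ",").getD []).map (fun p => PySem.Str.strip p)
  (parts.foldl
    (fun (acc : List String × PySem.Set String) p =>
      let sym := pvNormalizeSymbol p
      if (sym != "") && !(PySem.Set.contains acc.2 sym) then
        (acc.1 ++ [sym], PySem.Set.add acc.2 sym)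
      else acc)
    ([], PySem.Set.empty)).1

-- ===== PORT B =====
-- the while loop of Source B: out grows at the back, rest shrinks by a filter each round
def pvDedupLoop (out rest : List String) : List String :=
  match rest with
  | [] => out
  | h :: t => pvDedupLoop (out ++ [h]) (t.filter (fun x => x != h))
termination_by rest.length
decreasing_by
  simpa using Nat.lt_succ_of_le (List.length_filter_le _ _)

def parse_symbols_argument_alt (raw : String) : List String :=
  let text := PySem.Str.replace raw "\n" ","
  let syms := (((PySem.Str.split? text ",").getD []).map pvNormalizeSymbol).filter
      (fun s => s != "")
  pvDedupLoop [] syms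

-- ===== PRECONDITION & SPEC =====
def Spec_parse_symbols_argument (raw : String) (out : List String) : Prop := out = parse_symbols_argument_alt raw
instance (raw : String) (out : List String) : Decidable (Spec_parse_symbols_argument raw out) := by unfold Spec_parse_symbols_argument; infer_instance

-- ===== CLAIM (what is proved, stated in full; the proofs are below) =====
def Claim_equal_parse_symbols_argument : Prop := ∀ (raw : String), Dom_parse_symbols_argument raw → Spec_parse_symbols_argument raw (parse_symbols_argument raw)

-- ===== LEMMAS AND PROOFS =====

-- a prefix of a list with no leading p-elements has no leading p-elements either
theorem pv_dropWhile_prefix {α : Type} (p : α → Bool) (m' m : List α)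
    (hpre : m' <+: m) (hm : List.dropWhile p m = m) : List.dropWhile p m' = m' := by
  cases m' with
  | nil => simp
  | cons a t =>
    obtain ⟨r, hr⟩ := hpre
    have hpa : p a = false := by
      rw [← hr, List.dropWhile_eq_self_iff] at hm
      simpa using hm
    simp [hpa]

-- Python's strip is idempotent (Chars level).
theorem pv_chars_strip_idem (l : List Char) :
    PySem.Chars.strip (PySem.Chars.strip l) = PySem.Chars.strip l := by
  simp only [PySem.Chars.strip, PySem.Chars.rstrip, PySem.Chars.lstrip]
  set p := PySem.Chars.isspace
  set m := List.dropWhile p l with hmdef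
  have hm : List.dropWhile p m = m := List.dropWhile_idempotent p l
  have hpre : (List.dropWhile p m.reverse).reverse <+: m := by
    have := List.dropWhile_suffix (l := m.reverse) p
    have h2 : (List.dropWhile p m.reverse).reverse <+: m.reverse.reverse :=
      List.reverse_prefix.mpr this
    simpa using h2
  rw [pv_dropWhile_prefix p _ m hpre hm]
  simp [List.dropWhile_idempotent]

theorem pv_strip_idem (s : String) :
    PySem.Str.strip (PySem.Str.strip s) = PySem.Str.strip s := by
  simp [PySem.Str.strip, pv_chars_strip_idem]

theorem pv_norm_strip (p : String) :
    pvNormalizeSymbol (PySem.Str.strip p) = pvNormalizeSymbol p := by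
  simp [pvNormalizeSymbol, pv_strip_idem]

-- A's loop keeps out and seen equal as lists, so it is the single-accumulator loop.
theorem pv_pairfold (l : List String) (s : List String) :
    l.foldl
      (fun (acc : List String × PySem.Set String) p =>
        if (pvNormalizeSymbol p != "") && !(PySem.Set.contains acc.2 (pvNormalizeSymbol p)) then
          (acc.1 ++ [pvNormalizeSymbol p], PySem.Set.add acc.2 (pvNormalizeSymbol p))
        else acc)
      (s, s)
    = (let t := l.foldl
        (fun (s : List String) p =>
          if (pvNormalizeSymbol p != "") && !(PySem.Set.contains s (pvNormalizeSymbol p)) then s ++ [pvNormalizeSymbol p] else s) s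
       (t, t)) := by
  induction l generalizing s with
  | nil => rfl
  | cons h t ih =>
    simp only [List.foldl_cons]
    by_cases hc : ((pvNormalizeSymbol h != "") && !(PySem.Set.contains s (pvNormalizeSymbol h))) = true
    · simp only [hc, if_pos]
      have hmem : PySem.Set.contains s (pvNormalizeSymbol h) = false := by
        simp only [Bool.and_eq_true, Bool.not_eq_true'] at hc
        exact hc.2
      have : PySem.Set.add s (pvNormalizeSymbol h) = s ++ [pvNormalizeSymbol h] := by
        have : pvNormalizeSymbol h ∉ s := by simpa using hmem
        simp [PySem.Set.add, PySem.Set.contains, this]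
      rw [this]; exact ih _
    · simp only [hc, if_neg, Bool.false_eq_true, not_false_iff]
      exact ih s

-- The single-accumulator loop is Set.add folded over the nonempty normalized symbols.
theorem pv_singlefold (l : List String) :
    l.foldl
      (fun (s : List String) p =>
        if (pvNormalizeSymbol p != "") && !(PySem.Set.contains s (pvNormalizeSymbol p)) then s ++ [pvNormalizeSymbol p] else s) []
    = PySem.List.dedup ((l.map pvNormalizeSymbol).filter (fun s => s != "")) := by
  rw [show (fun (s : List String) p =>
        if (pvNormalizeSymbol p != "") && !(PySem.Set.contains s (pvNormalizeSymbol p)) then s ++ [pvNormalizeSymbol p] else s)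
      = (fun (s : List String) p =>
        (fun (s : List String) (sym : String) =>
          if (sym != "") && !(PySem.Set.contains s sym) then s ++ [sym] else s) s (pvNormalizeSymbol p)) from rfl,
     ← List.foldl_map (f := pvNormalizeSymbol)
        (g := fun (s : List String) (sym : String) =>
          if (sym != "") && !(PySem.Set.contains s sym) then s ++ [sym] else s)]
  rw [PySem.List.foldl_congr_mem (l.map pvNormalizeSymbol)
      (fun (s : List String) (sym : String) =>
        if (sym != "") && !(PySem.Set.contains s sym) then s ++ [sym] else s)
      (fun (s : List String) (sym : String) =>
        if (sym != "") then (if !(PySem.Set.contains s sym) then s ++ [sym] else s) else s)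
      []
      (by intro acc x _; by_cases h1 : (x != "") = true <;> simp [h1])]
  rw [PySem.List.foldl_if_eq_foldl_filter]
  rw [PySem.List.foldl_congr_mem ((l.map pvNormalizeSymbol).filter (fun s => s != ""))
      (fun (s : List String) (sym : String) =>
        if !(PySem.Set.contains s sym) then s ++ [sym] else s)
      PySem.Set.add
      []
      (by intro acc x _; simp [PySem.Set.add, PySem.Set.contains])]
  rw [← PySem.Set.ofList_eq_foldl]
  simp [PySem.List.dedup_eq_ofList]

-- set(...) of a filtered list is the filtered set: ofList commutes with filter.
theorem pv_ofList_filter (p : String → Bool) (xs : List String) :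
    PySem.Set.ofList (xs.filter p) = (PySem.Set.ofList xs).filter p := by
  induction xs with
  | nil => rfl
  | cons a t ih =>
    rw [PySem.Set.ofList_cons]
    cases hpa : p a with
    | true =>
      rw [List.filter_cons_of_pos hpa, PySem.Set.ofList_cons, ih]
      simp only [PySem.Set.discard, List.filter_cons_of_pos hpa]
      rw [List.filter_comm]
    | false =>
      rw [List.filter_cons_of_neg (by simp [hpa]), ih]
      simp only [PySem.Set.discard]
      rw [List.filter_cons_of_neg (by simp [hpa]), List.filter_filter]
      symm
      apply List.filter_congr
      intro x _
      by_cases hx : x = a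
      · subst hx; simp [hpa]
      · simp [hx]

-- the worklist loop computes out ++ set(rest) (first occurrences, in order)
theorem pv_dedupLoop_aux (n : Nat) : ∀ (rest out : List String), rest.length ≤ n →
    pvDedupLoop out rest = out ++ PySem.Set.ofList rest := by
  induction n with
  | zero =>
    intro rest out hlen
    have : rest = [] := List.eq_nil_of_length_eq_zero (Nat.le_zero.mp hlen)
    subst this
    simp [pvDedupLoop, PySem.Set.ofList]
  | succ n ih =>
    intro rest out hlen
    match rest with
    | [] => simp [pvDedupLoop, PySem.Set.ofList]
    | h :: t =>
      rw [pvDedupLoop, ih _ _ (by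
        have := List.length_filter_le (fun x => x != h) t
        simp at hlen
        omega)]
      rw [PySem.Set.ofList_cons]
      have he : (t.filter (fun x => x != h)) = t.filter (fun x => !(x == h)) := rfl
      rw [he, pv_ofList_filter]
      simp [PySem.Set.discard]

theorem pv_dedupLoop (rest out : List String) :
    pvDedupLoop out rest = out ++ PySem.Set.ofList rest :=
  pv_dedupLoop_aux rest.length rest out (Nat.le_refl _)

-- ===== VERDICT (by name: the statement is the Claim_ definition above) =====
theorem parse_symbols_argument_spec : Claim_equal_parse_symbols_argument := by
  intro raw _
  unfold Spec_parse_symbols_argument parse_symbols_argument parse_symbols_argument_alt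
  simp only [PySem.Set.empty]
  rw [pv_pairfold]
  simp only
  rw [pv_singlefold, pv_dedupLoop]
  simp [List.map_map, Function.comp_def, pv_norm_strip, PySem.List.dedup_eq_ofList]
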